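-- pv_equiv track=rewrite | github.com/K53N14/Trenirovki-1.0 | Лекция 4/b номер появления слова.py | numofwords
-- ===== SOURCE A (Python) =====
-- def numofwords(text):
-- 	textlist = text.split()
-- 	textdict= {}
-- 	ans = []
-- 	for word in textlist:
-- 		if word not in textdict:
-- 			textdict[word] = 0
-- 		ans.append(str(textdict[word]))
-- 		textdict[word] += 1
--
-- 	return ' '.join(ans)
-- ===== SOURCE B (Python) =====
-- def numofwords(text):
-- 	words = text.split()
-- 	ans = [str(words[:i].count(word)) for i, word in enumerate(words)]
-- 	return ' '.join(ans)
-- ===== Notes on version B (the rewrite author's own statement) =====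
-- stated objective: idiomatic
-- what changed: Replaces the maintained running-count dictionary with an enumerate comprehension that counts each word's occurrences in the already-seen prefix slice.
import Mathlib
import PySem

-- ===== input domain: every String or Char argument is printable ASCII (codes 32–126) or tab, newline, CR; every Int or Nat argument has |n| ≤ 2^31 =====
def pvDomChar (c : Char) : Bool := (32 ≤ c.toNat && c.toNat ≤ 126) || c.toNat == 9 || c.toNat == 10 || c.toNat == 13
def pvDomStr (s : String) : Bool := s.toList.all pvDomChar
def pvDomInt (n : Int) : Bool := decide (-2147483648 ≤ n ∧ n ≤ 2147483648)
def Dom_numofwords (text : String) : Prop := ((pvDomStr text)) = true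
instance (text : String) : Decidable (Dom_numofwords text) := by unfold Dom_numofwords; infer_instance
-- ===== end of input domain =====

-- B replaces A's running-count dictionary with an enumerate pass counting each word in the already-seen prefix slice (idiomatic; return values identical).

-- ===== PORT A =====
-- one step of A's loop body, state = (textdict, ans)
def numofwordsStepA (st : PySem.Dict String Int × List String) (word : String) :
    PySem.Dict String Int × List String :=
  let d := if st.1.contains word then st.1 else st.1.insert word 0
  let ans := st.2 ++ [PySem.Int.toStr (d.getD word 0)]
  (d.insert word (d.getD word 0 + 1), ans)

def numofwords (text : String) : String :=
  let textlist := PySem.Str.split₀ text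
  let st := textlist.foldl numofwordsStepA (PySem.Dict.empty, [])
  PySem.Str.join " " st.2

-- ===== PORT B =====
def numofwords_alt (text : String) : String :=
  let words := PySem.Str.split₀ text
  let ans := (PySem.List.enumerate words).map
    (fun p => PySem.Int.toStr (((PySem.List.slice words none (some p.1)).count p.2 : Int)))
  PySem.Str.join " " ans

-- ===== PRECONDITION & SPEC =====
def Spec_numofwords (text : String) (out : String) : Prop := out = numofwords_alt text
instance (text : String) (out : String) : Decidable (Spec_numofwords text out) := by unfold Spec_numofwords; infer_instance

-- ===== CLAIM (what is proved, stated in full; the proofs are below) =====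
def Claim_equal_numofwords : Prop := ∀ (text : String), Dom_numofwords text → Spec_numofwords text (numofwords text)

-- ===== LEMMAS AND PROOFS =====

-- reference sequence of occurrence numbers: pre = words already seen
def occSeq (pre l : List String) : List String :=
  match l with
  | [] => []
  | w :: t => PySem.Int.toStr (pre.count w : Int) :: occSeq (pre ++ [w]) t

lemma stepA_dict_getD (d : PySem.Dict String Int) (w v : String) :
    ((if d.contains w then d else d.insert w 0).insert w
      ((if d.contains w then d else d.insert w 0).getD w 0 + 1)).getD v 0
      = if v = w then d.getD w 0 + 1 else d.getD v 0 := by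
  by_cases hc : d.contains w
  · simp [hc, PySem.Dict.getD_insert]
  · have h0 : d.getD w 0 = 0 := by
      rw [PySem.Dict.getD_eq_get?_getD]
      have : d.get? w = none := by
        rw [PySem.Dict.get?_eq_none_iff_contains]; simpa using hc
      simp [this]
    simp [hc, PySem.Dict.getD_insert, h0]
    split_ifs <;> rfl

lemma stepA_dict_getD_self (d : PySem.Dict String Int) (w : String) :
    (if d.contains w then d else d.insert w 0).getD w 0 = d.getD w 0 := by
  by_cases hc : d.contains w
  · simp [hc]
  · have h0 : d.getD w 0 = 0 := by
      rw [PySem.Dict.getD_eq_get?_getD]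
      have : d.get? w = none := by
        rw [PySem.Dict.get?_eq_none_iff_contains]; simpa using hc
      simp [this]
    simp [hc, PySem.Dict.getD_insert_self, h0]

lemma foldlA_snd (l : List String) :
    ∀ (pre : List String) (d : PySem.Dict String Int) (acc : List String),
    (∀ v, d.getD v 0 = (pre.count v : Int)) →
    (l.foldl numofwordsStepA (d, acc)).2 = acc ++ occSeq pre l := by
  induction l with
  | nil => intro pre d acc _; simp [occSeq]
  | cons w t ih =>
    intro pre d acc hinv
    have hself : (if d.contains w then d else d.insert w 0).getD w 0 = d.getD w 0 :=
      stepA_dict_getD_self d w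
    have hstep : (List.foldl numofwordsStepA (numofwordsStepA (d, acc) w) t).2
        = (acc ++ [PySem.Int.toStr (pre.count w : Int)]) ++ occSeq (pre ++ [w]) t := by
      have := ih (pre ++ [w])
        ((if d.contains w then d else d.insert w 0).insert w
          ((if d.contains w then d else d.insert w 0).getD w 0 + 1))
        (acc ++ [PySem.Int.toStr ((if d.contains w then d else d.insert w 0).getD w 0)])
        (by
          intro v
          rw [stepA_dict_getD d w v, List.count_append]
          by_cases hv : v = w
          · subst hv; simp [hinv v]
          · simp [hv, hinv v, Ne.symm hv])
      simpa [numofwordsStepA, hself, hinv w] using this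
    simpa [occSeq, List.foldl_cons] using hstep
  -- note: `numofwordsStepA (d, acc) w` unfolds to the state used in `ih` above

lemma mapB_eq_occSeq (l : List String) :
    ∀ (pre : List String),
    (PySem.List.enumerate l (pre.length : Int)).map
      (fun p => PySem.Int.toStr (((PySem.List.slice (pre ++ l) none (some p.1)).count p.2 : Int)))
      = occSeq pre l := by
  induction l with
  | nil => intro pre; simp [PySem.List.enumerate, occSeq]
  | cons w t ih =>
    intro pre
    rw [PySem.List.enumerate_cons, List.map_cons]
    have hslice : PySem.List.slice (pre ++ w :: t) none (some (pre.length : Int)) = pre := by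
      rw [PySem.List.slice_to _ (by positivity : (0:Int) ≤ (pre.length : Int))]
      simp
    have htail : (PySem.List.enumerate t ((pre.length : Int) + 1)).map
        (fun p => PySem.Int.toStr (((PySem.List.slice (pre ++ w :: t) none (some p.1)).count p.2 : Int)))
        = occSeq (pre ++ [w]) t := by
      have := ih (pre ++ [w])
      simpa [List.append_assoc, List.length_append, add_comm] using this
    rw [occSeq, hslice, htail]

-- ===== VERDICT (by name: the statement is the Claim_ definition above) =====
theorem numofwords_spec : Claim_equal_numofwords := by
  intro text _
  have hA := foldlA_snd (PySem.Str.split₀ text) [] PySem.Dict.empty []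
    (by intro v; simp [PySem.Dict.getD_empty])
  have hB := mapB_eq_occSeq (PySem.Str.split₀ text) []
  simp only [List.length_nil, Nat.cast_zero, List.nil_append] at hA hB
  show PySem.Str.join " " ((PySem.Str.split₀ text).foldl numofwordsStepA (PySem.Dict.empty, [])).2
      = PySem.Str.join " " ((PySem.List.enumerate (PySem.Str.split₀ text)).map
        (fun p => PySem.Int.toStr (((PySem.List.slice (PySem.Str.split₀ text) none (some p.1)).count p.2 : Int))))
  rw [hA, hB]
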